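-- pv_equiv track=rewrite | github.com/zellyn/adventofcode | 2023/05/05.py | split_at_all
-- ===== SOURCE A (Python) =====
-- def split_at_all(range, map_ranges):
--     result = []
--     for split_point in sorted(set([x[0] for x in map_ranges] + [x[1]+1 for x in map_ranges])):
--         if split_point <= range[0]: continue
--         if split_point > range[1]:
--             return result + [range]
--         result.append((range[0], split_point-1))
--         range = (split_point, range[1])
--     return result + [range]
-- ===== SOURCE B (Python) =====
-- def split_at_all(range, map_ranges):
--     lo, hi = range
--     cuts = sorted({p for x in map_ranges for p in (x[0], x[1] + 1) if lo < p <= hi})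
--     starts = [lo] + cuts
--     ends = [c - 1 for c in cuts] + [hi]
--     return list(zip(starts, ends))
-- ===== Notes on version B (the rewrite author's own statement) =====
-- stated objective: alternative
-- what changed: B collects all in-range boundary points up front into a sorted set and builds every segment in one zip of consecutive boundaries, instead of A's incremental scan that mutates the range and early-returns.
import Mathlib
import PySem

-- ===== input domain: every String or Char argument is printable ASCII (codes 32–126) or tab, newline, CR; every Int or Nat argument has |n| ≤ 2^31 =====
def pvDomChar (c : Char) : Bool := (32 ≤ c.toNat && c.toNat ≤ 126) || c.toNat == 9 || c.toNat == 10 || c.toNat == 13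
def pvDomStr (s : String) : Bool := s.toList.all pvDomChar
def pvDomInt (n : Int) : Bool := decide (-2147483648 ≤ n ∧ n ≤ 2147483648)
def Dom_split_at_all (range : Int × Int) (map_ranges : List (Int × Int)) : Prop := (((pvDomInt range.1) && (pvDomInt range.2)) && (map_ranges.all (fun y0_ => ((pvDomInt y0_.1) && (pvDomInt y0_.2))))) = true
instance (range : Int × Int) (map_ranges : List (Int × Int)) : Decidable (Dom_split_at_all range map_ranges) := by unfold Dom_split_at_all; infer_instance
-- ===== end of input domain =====

-- B builds all in-range boundary points up front and zips consecutive boundaries (alternative decomposition, same cost).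

-- ===== PORT A =====
-- the for-loop with its early return, over (result, range) state
def splitA_loop (result : List (Int × Int)) (range : Int × Int) : List Int → List (Int × Int)
  | [] => result ++ [range]
  | p :: ps =>
    if p ≤ range.1 then splitA_loop result range ps
    else if p > range.2 then result ++ [range]
    else splitA_loop (result ++ [(range.1, p - 1)]) (p, range.2) ps

def split_at_all (range : Int × Int) (map_ranges : List (Int × Int)) : List (Int × Int) :=
  splitA_loop [] range
    (PySem.List.sorted
      (PySem.Set.ofList ((map_ranges.map (fun x => x.1)) ++ (map_ranges.map (fun x => x.2 + 1))))
      (fun p => p) false)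

-- ===== PORT B =====
def split_at_all_alt (range : Int × Int) (map_ranges : List (Int × Int)) : List (Int × Int) :=
  let lo := range.1
  let hi := range.2
  let cuts := PySem.List.sorted
    (PySem.Set.ofList
      ((map_ranges.flatMap (fun x => [x.1, x.2 + 1])).filter
        (fun p => decide (lo < p) && decide (p ≤ hi))))
    (fun p => p) false
  let starts := lo :: cuts
  let ends := cuts.map (fun c => c - 1) ++ [hi]
  starts.zip ends

-- ===== PRECONDITION & SPEC =====
def Spec_split_at_all (range : Int × Int) (map_ranges : List (Int × Int)) (out : List (Int × Int)) : Prop := out = split_at_all_alt range map_ranges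
instance (range : Int × Int) (map_ranges : List (Int × Int)) (out : List (Int × Int)) : Decidable (Spec_split_at_all range map_ranges out) := by unfold Spec_split_at_all; infer_instance

-- ===== CLAIM (what is proved, stated in full; the proofs are below) =====
def Claim_equal_split_at_all : Prop := ∀ (range : Int × Int) (map_ranges : List (Int × Int)), Dom_split_at_all range map_ranges → Spec_split_at_all range map_ranges (split_at_all range map_ranges)

-- ===== LEMMAS AND PROOFS =====

-- B's segment construction, as a function of the cut list
def buildB (lo hi : Int) (cuts : List Int) : List (Int × Int) :=
  (lo :: cuts).zip (cuts.map (fun c => c - 1) ++ [hi])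

lemma buildB_cons (lo hi p : Int) (cuts : List Int) :
    buildB lo hi (p :: cuts) = (lo, p - 1) :: buildB p hi cuts := by
  simp [buildB]

-- A's loop on a strictly increasing cut-point list produces B's pairing of the in-range points
lemma splitA_loop_eq (ps : List Int) (acc : List (Int × Int)) (lo hi : Int)
    (hps : ps.Pairwise (· < ·)) :
    splitA_loop acc (lo, hi) ps
      = acc ++ buildB lo hi (ps.filter (fun p => decide (lo < p) && decide (p ≤ hi))) := by
  induction ps generalizing acc lo with
  | nil => simp [splitA_loop, buildB]
  | cons p ps ih =>
    have hps' : ps.Pairwise (· < ·) := hps.tail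
    have hall : ∀ q ∈ ps, p < q := by
      intro q hq; exact List.rel_of_pairwise_cons hps hq
    by_cases h1 : p ≤ lo
    · have : ¬ lo < p := not_lt.mpr h1
      rw [show splitA_loop acc (lo, hi) (p :: ps) = splitA_loop acc (lo, hi) ps from by
        simp [splitA_loop, if_pos h1]]
      rw [ih acc lo hps']
      have : ((p :: ps).filter (fun q => decide (lo < q) && decide (q ≤ hi)))
          = ps.filter (fun q => decide (lo < q) && decide (q ≤ hi)) := by
        simp [this]
      rw [this]
    · by_cases h2 : hi < p
      · -- early return: every point from here on is > hi, the filter is empty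
        have hfilter : (p :: ps).filter (fun q => decide (lo < q) && decide (q ≤ hi)) = [] := by
          rw [List.filter_eq_nil_iff]
          intro q hq
          rcases List.mem_cons.mp hq with rfl | hq
          · simp [not_le.mpr h2]
          · have : hi < q := lt_trans h2 (hall q hq)
            simp [not_le.mpr this]
        rw [hfilter]
        simp [splitA_loop, if_neg h1, if_pos h2, buildB]
      · -- lo < p ≤ hi: emit segment (lo, p-1) and continue from p
        have hlt : lo < p := not_le.mp h1
        have hle : p ≤ hi := not_lt.mp h2
        have hstep : splitA_loop acc (lo, hi) (p :: ps)
            = splitA_loop (acc ++ [(lo, p - 1)]) (p, hi) ps := by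
          simp [splitA_loop, if_neg h1, if_neg (not_lt.mpr hle)]
        rw [hstep, ih (acc ++ [(lo, p - 1)]) p hps']
        have hfeq : ps.filter (fun q => decide (p < q) && decide (q ≤ hi))
            = ps.filter (fun q => decide (lo < q) && decide (q ≤ hi)) := by
          apply List.filter_congr
          intro q hq
          have hpq : p < q := hall q hq
          have : lo < q := lt_trans hlt hpq
          simp [hpq, this]
        have hfcons : (p :: ps).filter (fun q => decide (lo < q) && decide (q ≤ hi))
            = p :: ps.filter (fun q => decide (lo < q) && decide (q ≤ hi)) := by
          simp [hlt, hle]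
        rw [hfcons, buildB_cons, hfeq]
        simp

-- two strictly increasing integer lists with the same members are equal
lemma eq_of_pairwise_lt_of_mem_iff (xs ys : List Int)
    (hx : xs.Pairwise (· < ·)) (hy : ys.Pairwise (· < ·))
    (hmem : ∀ q : Int, q ∈ xs ↔ q ∈ ys) : xs = ys := by
  have hnx : xs.Nodup := hx.nodup
  have hny : ys.Nodup := hy.nodup
  have hperm : xs.Perm ys := (List.perm_ext_iff_of_nodup hnx hny).mpr hmem
  exact hperm.eq_of_pairwise (fun a b _ _ h1 h2 => absurd h2 (not_lt.mpr h1.le)) hx hy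

-- ===== VERDICT (by name: the statement is the Claim_ definition above) =====
theorem split_at_all_spec : Claim_equal_split_at_all := by
  intro range map_ranges _
  unfold Spec_split_at_all split_at_all split_at_all_alt
  obtain ⟨lo, hi⟩ := range
  rw [splitA_loop_eq _ _ _ _ (PySem.List.sorted_ofList_pairwise_lt _), List.nil_append]
  have h : (PySem.List.sorted
        (PySem.Set.ofList ((map_ranges.map (fun x => x.1)) ++ (map_ranges.map (fun x => x.2 + 1))))
        (fun p => p) false).filter (fun p => decide (lo < p) && decide (p ≤ hi))
      = PySem.List.sorted
          (PySem.Set.ofList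
            ((map_ranges.flatMap (fun x => [x.1, x.2 + 1])).filter
              (fun p => decide (lo < p) && decide (p ≤ hi))))
          (fun p => p) false := by
    apply eq_of_pairwise_lt_of_mem_iff
    · exact (PySem.List.sorted_ofList_pairwise_lt _).filter _
    · exact PySem.List.sorted_ofList_pairwise_lt _
    · intro q
      simp only [List.mem_filter, PySem.List.mem_sorted, PySem.Set.mem_ofList,
        List.mem_append, List.mem_map, List.mem_flatMap, List.mem_cons,
        List.not_mem_nil, or_false]
      constructor
      · rintro ⟨hq, hb⟩
        refine ⟨?_, hb⟩
        rcases hq with ⟨x, hx, rfl⟩ | ⟨x, hx, rfl⟩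
        · exact ⟨x, hx, Or.inl rfl⟩
        · exact ⟨x, hx, Or.inr rfl⟩
      · rintro ⟨⟨x, hx, h1 | h1⟩, hb⟩ <;> subst h1
        · exact ⟨Or.inl ⟨x, hx, rfl⟩, hb⟩
        · exact ⟨Or.inr ⟨x, hx, rfl⟩, hb⟩
  rw [h]
  rfl
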